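-- pv_equiv track=rewrite | github.com/cpdd29/XXL | backend/app/brain_core/task_view/service.py | _latest_active_step
-- ===== SOURCE A (Python) =====
-- from typing import Any, Callable
--
-- def _latest_active_step(steps: list[dict[str, Any]] | None) -> dict[str, Any] | None:
--     if not isinstance(steps, list):
--         return None
--     for status_value in ("running", "pending"):
--         for step in reversed(steps):
--             if str(step.get("status") or "").strip().lower() == status_value:
--                 return step
--     return None
-- ===== SOURCE B (Python) =====
-- from typing import Any
--
-- def _latest_active_step(steps: list[dict[str, Any]] | None) -> dict[str, Any] | None:
--     if not isinstance(steps, list):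
--         return None
--     running_match = None
--     pending_match = None
--     for step in steps:
--         status = str(step.get("status") or "").strip().lower()
--         if status == "running":
--             running_match = step
--         elif status == "pending":
--             pending_match = step
--     return running_match if running_match is not None else pending_match
-- ===== Notes on version B (the rewrite author's own statement) =====
-- stated objective: simpler
-- what changed: Replaces the two nested reverse scans (one per status) with a single forward pass that keeps the last-seen running and pending candidates and returns running first.
import Mathlib
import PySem

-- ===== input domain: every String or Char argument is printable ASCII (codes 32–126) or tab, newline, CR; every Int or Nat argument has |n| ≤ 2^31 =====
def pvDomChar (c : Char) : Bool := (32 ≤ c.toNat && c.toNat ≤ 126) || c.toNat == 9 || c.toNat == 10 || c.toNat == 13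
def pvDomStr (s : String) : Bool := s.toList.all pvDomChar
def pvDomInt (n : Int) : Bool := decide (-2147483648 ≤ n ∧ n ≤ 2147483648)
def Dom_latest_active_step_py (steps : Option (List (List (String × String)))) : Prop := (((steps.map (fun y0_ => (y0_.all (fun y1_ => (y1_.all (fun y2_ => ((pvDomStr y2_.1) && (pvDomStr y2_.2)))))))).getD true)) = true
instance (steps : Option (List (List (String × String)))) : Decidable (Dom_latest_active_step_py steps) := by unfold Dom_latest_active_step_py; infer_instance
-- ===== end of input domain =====

-- B replaces A's two reverse scans (one per status) by a single forward pass that keeps the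
-- last-seen "running" and "pending" candidates; objective: simpler (one pass).

-- ===== PORT A =====
-- str(step.get("status") or "").strip().lower()  — shared by both ports (identical expression in both Pythons)
def pvNorm (step : List (String × String)) : String :=
  PySem.Str.lower (PySem.Str.strip ((step.lookup "status").getD ""))

-- inner loop: `for step in reversed(steps): if … == status_value: return step`
def pvFindRev (l : List (List (String × String))) (v : String) : Option (List (String × String)) :=
  l.reverse.find? (fun s => pvNorm s == v)

-- outer loop: `for status_value in ("running", "pending"): …`
def pvLoopA (l : List (List (String × String))) : List String → Option (List (String × String))
  | [] => none
  | v :: vs =>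
    match pvFindRev l v with
    | some st => some st
    | none => pvLoopA l vs

def latest_active_step_py (steps : Option (List (List (String × String)))) : Option (List (String × String)) :=
  match steps with
  | none => none
  | some l => pvLoopA l ["running", "pending"]

-- ===== PORT B =====
def pvStepB (acc : Option (List (String × String)) × Option (List (String × String)))
    (step : List (String × String)) :
    Option (List (String × String)) × Option (List (String × String)) :=
  let status := pvNorm step
  if status == "running" then (some step, acc.2)
  else if status == "pending" then (acc.1, some step)
  else acc

def latest_active_step_py_alt (steps : Option (List (List (String × String)))) : Option (List (String × String)) :=
  match steps with
  | none => none
  | some l =>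
    let rp := l.foldl pvStepB (none, none)
    match rp.1 with
    | some st => some st
    | none => rp.2

-- ===== PRECONDITION & SPEC =====
def Spec_latest_active_step_py (steps : Option (List (List (String × String)))) (out : Option (List (String × String))) : Prop := out = latest_active_step_py_alt steps
instance (steps : Option (List (List (String × String)))) (out : Option (List (String × String))) : Decidable (Spec_latest_active_step_py steps out) := by unfold Spec_latest_active_step_py; infer_instance

-- ===== CLAIM (what is proved, stated in full; the proofs are below) =====
def Claim_equal_latest_active_step_py : Prop := ∀ (steps : Option (List (List (String × String)))), Dom_latest_active_step_py steps → Spec_latest_active_step_py steps (latest_active_step_py steps)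

-- ===== LEMMAS AND PROOFS =====

-- B's fold keeps, in each slot, the last matching element: expressed via find? on the reverse.
theorem pvFoldB_eq (l : List (List (String × String)))
    (r0 p0 : Option (List (String × String))) :
    l.foldl pvStepB (r0, p0) =
      ((l.reverse.find? (fun s => pvNorm s == "running")).or r0,
       (l.reverse.find? (fun s => pvNorm s == "pending")).or p0) := by
  induction l generalizing r0 p0 with
  | nil => simp
  | cons x xs ih =>
    simp only [List.foldl_cons, List.reverse_cons, List.find?_append]
    rw [ih]
    unfold pvStepB
    by_cases hr : pvNorm x == "running"
    · have hp : (pvNorm x == "pending") = false := by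
        simp only [beq_iff_eq] at hr ⊢
        rw [hr]; decide
      simp [hr, hp, Option.or_assoc]
    · by_cases hp : pvNorm x == "pending"
      · simp only [Bool.not_eq_true] at hr
        simp [hr, hp, Option.or_assoc]
      · simp only [Bool.not_eq_true] at hr hp
        simp [hr, hp]

-- ===== VERDICT (by name: the statement is the Claim_ definition above) =====
theorem latest_active_step_py_spec : Claim_equal_latest_active_step_py := by
  intro steps _
  unfold Spec_latest_active_step_py latest_active_step_py latest_active_step_py_alt
  cases steps with
  | none => rfl
  | some l =>
    simp only [pvFoldB_eq, Option.or_none]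
    unfold pvLoopA pvLoopA pvLoopA pvFindRev
    cases hR : l.reverse.find? (fun s => pvNorm s == "running") with
    | some st => simp
    | none =>
      cases hP : l.reverse.find? (fun s => pvNorm s == "pending") <;> simp
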